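-- pv_equiv track=rewrite | github.com/andrewcolinhunt/artisan-dev | src/artisan/execution/inputs/lineage_matching.py | _build_target_ancestry_index
-- ===== SOURCE A (Python) =====
-- from collections import deque
--
-- def _build_target_ancestry_index(
--     target_ids: set[str],
--     provenance_map: dict[str, list[str]],
-- ) -> dict[str, str]:
--     """BFS backward from each target to build an ancestry lookup index.
--
--     Records {ancestor_id: target_id} so any ancestor resolves to its
--     target in O(1). Targets are included in the index (map to themselves).
--     First-claim-wins for shared ancestors.
--
--     Args:
--         target_ids: Set of target artifact IDs.
--         provenance_map: {target_id: [source_ids]}.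
--
--     Returns:
--         Dict mapping ancestor IDs to their owning target ID.
--     """
--     index: dict[str, str] = {}
--     for target_id in target_ids:
--         queue = deque([target_id])
--         visited = {target_id}
--         while queue:
--             current = queue.popleft()
--             if current not in index:
--                 index[current] = target_id
--             for source in provenance_map.get(current, []):
--                 if source not in visited:
--                     visited.add(source)
--                     queue.append(source)
--     return index
-- ===== SOURCE B (Python) =====
-- def _build_target_ancestry_index(target_ids, provenance_map):
--     # Worklist without a visited set: the global index itself marks processed
--     # nodes. A node already in the index is never expanded again (its whole
--     # ancestry is already claimed), so across all targets each node is
--     # expanded at most once: one global traversal rather than one per target.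
--     index = {}
--     for target_id in target_ids:
--         pending = [target_id]
--         i = 0
--         while i < len(pending):
--             node = pending[i]
--             i += 1
--             if node in index:
--                 continue
--             index[node] = target_id
--             pending.extend(provenance_map.get(node, []))
--     return index
-- ===== Notes on version B (the rewrite author's own statement) =====
-- stated objective: alternative
-- what changed: Replaces the per-target BFS with deque + per-target visited set by a visited-set-free worklist in which the global index itself marks processed nodes: an already-indexed node is pruned instead of expanded, so each node is expanded at most once across all targets (one global traversal; intended as faster, but a timing run read only a borderline 1.4-1.6x at the largest size, so no speed is claimed).
import Mathlib
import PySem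

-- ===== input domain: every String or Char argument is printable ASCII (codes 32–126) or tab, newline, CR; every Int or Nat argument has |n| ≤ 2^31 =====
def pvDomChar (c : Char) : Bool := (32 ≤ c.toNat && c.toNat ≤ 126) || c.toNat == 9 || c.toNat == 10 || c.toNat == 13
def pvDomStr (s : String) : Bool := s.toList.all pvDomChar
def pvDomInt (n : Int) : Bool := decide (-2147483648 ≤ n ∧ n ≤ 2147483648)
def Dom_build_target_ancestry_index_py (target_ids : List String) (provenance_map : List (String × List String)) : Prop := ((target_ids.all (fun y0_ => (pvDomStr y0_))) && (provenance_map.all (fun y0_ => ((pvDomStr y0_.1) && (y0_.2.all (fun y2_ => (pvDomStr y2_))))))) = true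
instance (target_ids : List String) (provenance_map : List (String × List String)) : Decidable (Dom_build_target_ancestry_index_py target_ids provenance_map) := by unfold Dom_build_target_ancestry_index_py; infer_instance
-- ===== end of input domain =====

-- B replaces A's per-target BFS (deque + per-target visited set) by a visited-set-free worklist
-- in which the global index itself marks processed nodes: already-indexed nodes are pruned
-- instead of expanded, so each node is expanded at most once across all targets (alternative).

-- shared context helpers: dict.get(current, []) on the provenance map (first match),
-- 'x in index' membership, and all strings ever obtainable from the map (termination only).
def pvSrc : List (String × List String) → String → List String
  | [], _ => []
  | kv :: rest, c => if kv.1 == c then kv.2 else pvSrc rest c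

def pvHasKey (idx : List (String × String)) (c : String) : Bool :=
  idx.any (fun kv => kv.1 == c)

def pvAllSrcs (pm : List (String × List String)) : List String :=
  pm.flatMap (fun kv => kv.2)

-- termination-measure helper lemmas (cited by the ports' decreasing_by)
theorem pvSrc_subset (pm : List (String × List String)) (c : String) :
    ∀ s ∈ pvSrc pm c, s ∈ pvAllSrcs pm := by
  induction pm with
  | nil => simp [pvSrc]
  | cons kv rest ih =>
    intro s hs
    simp only [pvSrc] at hs
    simp only [pvAllSrcs, List.flatMap_cons, List.mem_append]
    split at hs
    · exact Or.inl hs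
    · exact Or.inr (ih s hs)

-- ===== PORT A =====
-- A's guarded index insertion: 'if current not in index: index[current] = target_id'
def pvIns (t : String) (idx : List (String × String)) (c : String) : List (String × String) :=
  if pvHasKey idx c then idx else idx ++ [(c, t)]

-- A's inner loop body: 'if source not in visited: visited.add(source); queue.append(source)'
def pvStep (p : List String × List String) (s : String) : List String × List String :=
  if s ∈ p.1 then p else (p.1 ++ [s], p.2 ++ [s])

theorem pvStep_spec (srcs : List String) : ∀ (vis : List String),
    ∃ added, (∀ q : List String, srcs.foldl pvStep (vis, q) = (vis ++ added, q ++ added)) ∧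
      added.Nodup ∧ ∀ a ∈ added, a ∈ srcs ∧ a ∉ vis := by
  induction srcs with
  | nil => intro vis; exact ⟨[], by simp⟩
  | cons s rest ih =>
    intro vis
    by_cases hs : s ∈ vis
    · obtain ⟨added, heq, hnd, hmem⟩ := ih vis
      refine ⟨added, ?_, hnd, fun a ha => ⟨List.mem_cons_of_mem _ (hmem a ha).1, (hmem a ha).2⟩⟩
      intro q
      simp only [List.foldl_cons, pvStep, if_pos hs]
      exact heq q
    · obtain ⟨added, heq, hnd, hmem⟩ := ih (vis ++ [s])
      refine ⟨s :: added, ?_, ?_, ?_⟩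
      · intro q
        simp only [List.foldl_cons, pvStep, if_neg hs]
        rw [heq (q ++ [s])]; simp
      · exact List.nodup_cons.mpr ⟨fun h => by simpa [hs] using (hmem s h).2, hnd⟩
      · intro a ha
        rcases List.mem_cons.mp ha with rfl | ha
        · exact ⟨List.mem_cons_self, hs⟩
        · have := hmem a ha
          refine ⟨List.mem_cons_of_mem _ this.1, fun hv => this.2 (by simp [hv])⟩

theorem pvCard_step (pm : List (String × List String)) (vis added : List String)
    (hnd : added.Nodup) (hmem : ∀ a ∈ added, a ∈ pvAllSrcs pm ∧ a ∉ vis) :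
    ((vis ++ added).toFinset ∩ (pvAllSrcs pm).toFinset).card
      = (vis.toFinset ∩ (pvAllSrcs pm).toFinset).card + added.length ∧
    (vis.toFinset ∩ (pvAllSrcs pm).toFinset).card + added.length
      ≤ (pvAllSrcs pm).toFinset.card := by
  classical
  have hsub : added.toFinset ⊆ (pvAllSrcs pm).toFinset := by
    intro a ha; simp only [List.mem_toFinset] at *; exact (hmem a ha).1
  have hdisj : Disjoint (vis.toFinset ∩ (pvAllSrcs pm).toFinset) added.toFinset := by
    rw [Finset.disjoint_left]
    intro a ha hb
    simp only [Finset.mem_inter, List.mem_toFinset] at ha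
    exact (hmem a (List.mem_toFinset.mp hb)).2 ha.1
  have hunion : (vis ++ added).toFinset ∩ (pvAllSrcs pm).toFinset
      = (vis.toFinset ∩ (pvAllSrcs pm).toFinset) ∪ added.toFinset := by
    rw [List.toFinset_append, Finset.union_inter_distrib_right,
      Finset.inter_eq_left.mpr hsub]
  have hcardadd : added.toFinset.card = added.length := List.toFinset_card_of_nodup hnd
  constructor
  · rw [hunion, Finset.card_union_of_disjoint hdisj, hcardadd]
  · have hle : (vis.toFinset ∩ (pvAllSrcs pm).toFinset) ∪ added.toFinset
        ⊆ (pvAllSrcs pm).toFinset :=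
      Finset.union_subset Finset.inter_subset_right hsub
    have := Finset.card_le_card hle
    rwa [Finset.card_union_of_disjoint hdisj, hcardadd] at this

-- A's per-target BFS: pop from the front of the queue, record the node if unindexed,
-- append its unvisited sources to queue and visited.
def pvBfsA (pm : List (String × List String)) (t : String)
    (q vis : List String) (idx : List (String × String)) : List (String × String) :=
  match q with
  | [] => idx
  | c :: qs =>
    let idx' := pvIns t idx c
    let pr := (pvSrc pm c).foldl pvStep (vis, qs)
    pvBfsA pm t pr.2 pr.1 idx'
termination_by
  2 * ((pvAllSrcs pm).toFinset.card - (vis.toFinset ∩ (pvAllSrcs pm).toFinset).card) + q.length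
decreasing_by
  obtain ⟨added, heq, hnd, hmem⟩ := pvStep_spec (pvSrc pm c) vis
  have hmem' : ∀ a ∈ added, a ∈ pvAllSrcs pm ∧ a ∉ vis :=
    fun a ha => ⟨pvSrc_subset pm c a (hmem a ha).1, (hmem a ha).2⟩
  obtain ⟨hcard, hle⟩ := pvCard_step pm vis added hnd hmem'
  simp only [heq qs, List.length_append, List.length_cons, hcard]
  omega

def build_target_ancestry_index_py (target_ids : List String) (provenance_map : List (String × List String)) : List (String × String) :=
  target_ids.foldl (fun idx t => pvBfsA provenance_map t [t] [t] idx) []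

-- ===== PORT B =====
-- B's worklist loop: no visited set; a node already in the index is skipped
-- (pruned), otherwise it is indexed and all its sources appended.
def pvBfsB (pm : List (String × List String)) (t : String)
    (pending : List String) (idx : List (String × String)) : List (String × String) :=
  match pending with
  | [] => idx
  | c :: rest =>
    if pvHasKey idx c then pvBfsB pm t rest idx
    else pvBfsB pm t (rest ++ pvSrc pm c) (idx ++ [(c, t)])
termination_by
  (((insert t (pending.toFinset ∪ (pvAllSrcs pm).toFinset)) \ (idx.map Prod.fst).toFinset).card,
   pending.length)
decreasing_by
  · -- skip branch: universe shrinks or stays, pending shorter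
    have hsub : (insert t (rest.toFinset ∪ (pvAllSrcs pm).toFinset)) \ (idx.map Prod.fst).toFinset
        ⊆ (insert t ((c :: rest).toFinset ∪ (pvAllSrcs pm).toFinset)) \ (idx.map Prod.fst).toFinset := by
      apply Finset.sdiff_subset_sdiff _ (Finset.Subset.refl _)
      intro x hx
      simp only [Finset.mem_insert, Finset.mem_union, List.mem_toFinset, List.mem_cons] at hx ⊢
      tauto
    have hle := Finset.card_le_card hsub
    rcases lt_or_eq_of_le hle with h | h
    · exact Prod.Lex.left _ _ h
    · rw [h]; exact Prod.Lex.right _ (by simp)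
  · -- insert branch: c leaves the unindexed universe
    apply Prod.Lex.left
    apply Finset.card_lt_card
    rw [Finset.ssubset_iff_of_subset]
    · refine ⟨c, ?_, ?_⟩
      · simp only [Finset.mem_sdiff, Finset.mem_insert, Finset.mem_union, List.mem_toFinset,
          List.mem_cons, List.mem_map]
        constructor
        · tauto
        · intro ⟨kv, hkv, hfst⟩
          have : pvHasKey idx c = true := by
            unfold pvHasKey
            simp only [List.any_eq_true]
            exact ⟨kv, hkv, by simp [hfst]⟩
          simp_all
      · simp only [Finset.mem_sdiff, List.mem_toFinset, List.mem_map, not_and, not_not]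
        intro _
        exact ⟨(c, t), by simp⟩
    · apply Finset.sdiff_subset_sdiff
      · intro x hx
        simp only [Finset.mem_insert, Finset.mem_union, List.mem_toFinset, List.mem_cons,
          List.mem_append] at hx ⊢
        rcases hx with h | h
        · tauto
        · rcases h with h | h
          · rcases h with h | h
            · tauto
            · exact Or.inr (Or.inr (pvSrc_subset pm c x h))
          · tauto
      · intro x hx
        simp only [List.mem_toFinset, List.mem_map] at hx ⊢
        obtain ⟨kv, hkv, hfst⟩ := hx
        exact ⟨kv, List.mem_append_left _ hkv, hfst⟩

def build_target_ancestry_index_py_alt (target_ids : List String) (provenance_map : List (String × List String)) : List (String × String) :=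
  target_ids.foldl (fun idx t => pvBfsB provenance_map t [t] idx) []

-- ===== PRECONDITION & SPEC =====
def Spec_build_target_ancestry_index_py (target_ids : List String) (provenance_map : List (String × List String)) (out : List (String × String)) : Prop := out = build_target_ancestry_index_py_alt target_ids provenance_map
instance (target_ids : List String) (provenance_map : List (String × List String)) (out : List (String × String)) : Decidable (Spec_build_target_ancestry_index_py target_ids provenance_map out) := by unfold Spec_build_target_ancestry_index_py; infer_instance

-- ===== CLAIM (what is proved, stated in full; the proofs are below) =====
def Claim_equal_build_target_ancestry_index_py : Prop := ∀ (target_ids : List String) (provenance_map : List (String × List String)), Dom_build_target_ancestry_index_py target_ids provenance_map → Spec_build_target_ancestry_index_py target_ids provenance_map (build_target_ancestry_index_py target_ids provenance_map)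

-- ===== LEMMAS AND PROOFS =====
-- dedup keeping first occurrences: the canonical view of B's pending list
def pvDfo : List String → List String
  | [] => []
  | x :: xs => x :: (pvDfo xs).filter (fun y => y != x)

theorem mem_pvDfo (l : List String) (a : String) : a ∈ pvDfo l ↔ a ∈ l := by
  induction l with
  | nil => simp [pvDfo]
  | cons x xs ih =>
    rw [pvDfo]
    by_cases hax : a = x
    · subst hax; simp
    · simp only [List.mem_cons, List.mem_filter, ih, bne_iff_ne]
      tauto

theorem pvDfo_eq_nil (l : List String) : pvDfo l = [] ↔ l = [] := by
  cases l <;> simp [pvDfo]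

theorem pvDfo_filter (p : String → Bool) (l : List String) :
    (pvDfo l).filter p = pvDfo (l.filter p) := by
  induction l with
  | nil => simp [pvDfo]
  | cons x xs ih =>
    rw [pvDfo]
    by_cases hp : p x = true
    · rw [List.filter_cons_of_pos hp, List.filter_filter,
        List.filter_cons_of_pos hp, pvDfo, ← ih, List.filter_filter]
      congr 1
      apply List.filter_congr
      intro y _
      rw [Bool.and_comm]
    · rw [List.filter_cons_of_neg (by simp [hp]), List.filter_filter,
        List.filter_cons_of_neg (by simp [hp]), ← ih]
      apply List.filter_congr
      intro y _
      by_cases hx : y = x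
      · subst hx; simp [hp]
      · simp [hx]

theorem pvDfo_append (X : List String) : ∀ (Y : List String),
    pvDfo (X ++ Y) = pvDfo X ++ pvDfo (Y.filter (fun y => !X.contains y)) := by
  induction X with
  | nil =>
    intro Y
    simp only [List.nil_append, pvDfo, List.contains_eq_mem]
    rw [List.filter_eq_self.mpr]
    intro y _
    simp
  | cons x xs ih =>
    intro Y
    have h1 : (x :: xs) ++ Y = x :: (xs ++ Y) := rfl
    rw [h1, pvDfo, pvDfo, ih, List.filter_append]
    congr 2
    rw [pvDfo_filter, List.filter_filter]
    congr 1
    apply List.filter_congr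
    intro y _
    by_cases hx : y = x
    · subst hx; simp
    · by_cases hm : y ∈ xs <;> simp [hx, hm, List.contains_eq_mem]

-- exact characterisation of A's visited/queue extension step
def pvNew (vis srcs : List String) : List String :=
  pvDfo (srcs.filter (fun s => !vis.contains s))

theorem mem_pvNew (vis srcs : List String) (a : String) :
    a ∈ pvNew vis srcs ↔ a ∈ srcs ∧ a ∉ vis := by
  simp [pvNew, mem_pvDfo, List.mem_filter, List.contains_eq_mem]

theorem pvDfo_nodup (l : List String) : (pvDfo l).Nodup := by
  induction l with
  | nil => simp [pvDfo]
  | cons x xs ih =>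
    rw [pvDfo, List.nodup_cons]
    refine ⟨fun h => ?_, ih.filter _⟩
    have := (List.mem_filter.mp h).2
    simp at this

theorem pvNew_nodup (vis srcs : List String) : (pvNew vis srcs).Nodup :=
  pvDfo_nodup _

theorem pvStep_eq (srcs : List String) : ∀ (vis q : List String),
    srcs.foldl pvStep (vis, q) = (vis ++ pvNew vis srcs, q ++ pvNew vis srcs) := by
  induction srcs with
  | nil => intro vis q; simp [pvNew, pvDfo]
  | cons s rest ih =>
    intro vis q
    simp only [List.foldl_cons, pvStep]
    by_cases hs : s ∈ vis
    · rw [if_pos hs, ih]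
      have : pvNew vis (s :: rest) = pvNew vis rest := by
        unfold pvNew
        rw [List.filter_cons_of_neg (by simp [List.contains_eq_mem, hs])]
      rw [this]
    · rw [if_neg hs, ih]
      have : pvNew vis (s :: rest) = s :: pvNew (vis ++ [s]) rest := by
        unfold pvNew
        rw [List.filter_cons_of_pos (by simp [List.contains_eq_mem, hs]), pvDfo,
          pvDfo_filter, List.filter_filter]
        congr 2
        apply List.filter_congr
        intro y _
        by_cases hy : y = s
        · subst hy; simp
        · by_cases hm : y ∈ vis <;> simp [hy, hm, List.contains_eq_mem]
      rw [this]
      simp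

-- pvHasKey bookkeeping
theorem pvHasKey_append_single (idx : List (String × String)) (c t x : String) :
    pvHasKey (idx ++ [(c, t)]) x = (pvHasKey idx x || (c == x)) := by
  simp [pvHasKey, List.any_append]

theorem pvHasKey_exists (idx : List (String × String)) (x : String)
    (h : pvHasKey idx x = true) : ∃ kv ∈ idx, kv.1 = x := by
  simp only [pvHasKey, List.any_eq_true, beq_iff_eq] at h
  exact h

-- B runs to completion doing nothing on an all-indexed worklist …
theorem pvB_skip_all (pm : List (String × List String)) (t : String) :
    ∀ (p : List String) (idx : List (String × String)),
    (∀ x ∈ p, pvHasKey idx x = true) → pvBfsB pm t p idx = idx := by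
  intro p
  induction p with
  | nil => intro idx _; rw [pvBfsB]
  | cons c rest ih =>
    intro idx h
    rw [pvBfsB.eq_def]
    simp only
    rw [if_pos (h c List.mem_cons_self)]
    exact ih idx (fun x hx => h x (List.mem_cons_of_mem _ hx))

-- … and skips an all-indexed prefix
theorem pvB_skip_prefix (pm : List (String × List String)) (t : String) :
    ∀ (p1 r : List String) (idx : List (String × String)),
    (∀ x ∈ p1, pvHasKey idx x = true) → pvBfsB pm t (p1 ++ r) idx = pvBfsB pm t r idx := by
  intro p1
  induction p1 with
  | nil => intro r idx _; rfl
  | cons c rest ih =>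
    intro r idx h
    have h1 : (c :: rest) ++ r = c :: (rest ++ r) := rfl
    rw [h1, pvBfsB.eq_def]
    simp only
    rw [if_pos (h c List.mem_cons_self)]
    exact ih r idx (fun x hx => h x (List.mem_cons_of_mem _ hx))

-- THE SIMULATION: A's BFS state (queue q, visited vis, index idx) and B's worklist p
-- produce the same index whenever the dedup'd unindexed view of p equals the unindexed
-- part of q, the index is closed up to vis, and vis's unindexed members all sit in q.
theorem pvSim (pm : List (String × List String)) (t : String) :
    ∀ (q vis : List String) (idx : List (String × String)),
    ∀ (p : List String),
    q.Nodup →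
    (∀ x ∈ q, x ∈ vis) →
    (∀ v ∈ vis, pvHasKey idx v = true ∨ v ∈ q) →
    (∀ kv ∈ idx, ∀ s ∈ pvSrc pm kv.1, pvHasKey idx s = true ∨ s ∈ vis) →
    q.filter (fun x => !pvHasKey idx x) = pvDfo (p.filter (fun x => !pvHasKey idx x)) →
    pvBfsA pm t q vis idx = pvBfsB pm t p idx := by
  intro q vis idx
  induction q, vis, idx using pvBfsA.induct pm t with
  | case1 vis idx =>
    intro p _ _ _ _ h5
    rw [pvBfsA.eq_def]
    refine (pvB_skip_all pm t p idx ?_).symm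
    have hnil : p.filter (fun x => !pvHasKey idx x) = [] := by
      have := h5.symm
      rw [List.filter_nil] at this
      exact (pvDfo_eq_nil _).mp this
    intro x hx
    by_contra hkx
    have : x ∈ p.filter (fun x => !pvHasKey idx x) :=
      List.mem_filter.mpr ⟨hx, by simp [hkx]⟩
    rw [hnil] at this
    exact absurd this List.not_mem_nil
  | case2 vis idx c qs idx' pr ih =>
    intro p h1 h2 h3 h4 h5
    have hidx : idx' = pvIns t idx c := rfl
    have hpr : pr = List.foldl pvStep (vis, qs) (pvSrc pm c) := rfl
    rw [hidx, hpr] at ih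
    rw [pvBfsA.eq_def]
    simp only
    rw [pvStep_eq (pvSrc pm c) vis qs]
    set N := pvNew vis (pvSrc pm c) with hN
    have ih' := ih
    rw [pvStep_eq (pvSrc pm c) vis qs] at ih'
    simp only at ih'
    -- common facts
    have hqnd : qs.Nodup := (List.nodup_cons.mp h1).2
    have hcq : c ∉ qs := (List.nodup_cons.mp h1).1
    have hqv : ∀ x ∈ qs, x ∈ vis := fun x hx => h2 x (List.mem_cons_of_mem _ hx)
    have hNv : ∀ a ∈ N, a ∉ vis := fun a ha => ((mem_pvNew _ _ _).mp ha).2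
    have hNs : ∀ a ∈ N, a ∈ pvSrc pm c := fun a ha => ((mem_pvNew _ _ _).mp ha).1
    have h1' : (qs ++ N).Nodup := by
      refine List.Nodup.append hqnd (pvNew_nodup vis (pvSrc pm c)) ?_
      intro a ha hNa
      exact hNv a hNa (hqv a ha)
    have h2' : ∀ x ∈ qs ++ N, x ∈ vis ++ N := by
      intro x hx
      rcases List.mem_append.mp hx with hx | hx
      · exact List.mem_append_left _ (hqv x hx)
      · exact List.mem_append_right _ hx
    by_cases hc : pvHasKey idx c = true
    · -- c already indexed: no insertion, all new queue members are indexed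
      have hins : pvIns t idx c = idx := by unfold pvIns; rw [hc]; simp
      rw [hins] at ih' ⊢
      have hNk : ∀ a ∈ N, pvHasKey idx a = true := by
        intro a ha
        obtain ⟨kv, hkv, hfst⟩ := pvHasKey_exists idx c hc
        rcases h4 kv hkv a (hfst ▸ hNs a ha) with h | h
        · exact h
        · exact absurd h (hNv a ha)
      refine ih' p h1' h2' ?_ ?_ ?_
      · intro v hv
        rcases List.mem_append.mp hv with hv | hv
        · rcases h3 v hv with h | h
          · exact Or.inl h
          · rcases List.mem_cons.mp h with rfl | h
            · exact Or.inl hc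
            · exact Or.inr (List.mem_append_left _ h)
        · exact Or.inl (hNk v hv)
      · intro kv hkv s hs
        rcases h4 kv hkv s hs with h | h
        · exact Or.inl h
        · exact Or.inr (List.mem_append_left _ h)
      · have hNnil : N.filter (fun x => !pvHasKey idx x) = [] :=
          List.filter_eq_nil_iff.mpr (fun a ha => by simp [hNk a ha])
        rw [List.filter_append, hNnil, List.append_nil]
        rw [List.filter_cons_of_neg (by simp [hc])] at h5
        exact h5
    · -- c gets indexed now
      have hins : pvIns t idx c = idx ++ [(c, t)] := by unfold pvIns; rw [if_neg hc]
      rw [hins] at ih' ⊢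
      have huc : (!pvHasKey idx c) = true := by simp [hc]
      rw [List.filter_cons_of_pos (p := fun x => !pvHasKey idx x) (l := qs) huc] at h5
      -- decompose p at the first unindexed element, which must be c
      obtain ⟨Z, hZ⟩ : ∃ Z, p.filter (fun x => !pvHasKey idx x) = c :: Z := by
        cases hfp : p.filter (fun x => !pvHasKey idx x) with
        | nil => rw [hfp, pvDfo] at h5; exact absurd h5 (by simp)
        | cons a Z =>
          rw [hfp, pvDfo] at h5
          obtain ⟨rfl, -⟩ := List.cons.inj h5
          exact ⟨Z, rfl⟩
      obtain ⟨p1, p2, hp, hp1, -, hZ2⟩ := List.filter_eq_cons_iff.mp hZ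
      have hZval : Z = p2.filter (fun x => !pvHasKey idx x) := hZ2.symm
      -- B side: skip the indexed prefix p1, then process c
      have hBside : pvBfsB pm t p idx = pvBfsB pm t (p2 ++ pvSrc pm c) (idx ++ [(c, t)]) := by
        rw [hp, pvB_skip_prefix pm t p1 (c :: p2) idx ?hpre]
        · rw [pvBfsB.eq_def]
          simp only
          rw [if_neg (by simp [hc])]
        case hpre =>
          intro x hx
          simpa using hp1 x hx
      rw [hBside]
      -- Bool form of the new "unindexed" predicate
      have hu2 : ∀ x, (!pvHasKey (idx ++ [(c, t)]) x) = ((!pvHasKey idx x) && (x != c)) := by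
        intro x
        rw [pvHasKey_append_single]
        by_cases hxc : x = c
        · subst hxc; simp
        · have : (c == x) = false := by simp [Ne.symm hxc]
          simp [this, hxc]
      -- h5 rewritten: filter u qs = pvDfo (p2.filter u2)
      have h5' : qs.filter (fun x => !pvHasKey idx x)
          = pvDfo (p2.filter (fun x => !pvHasKey (idx ++ [(c, t)]) x)) := by
        have hcons := h5
        rw [hZ, pvDfo] at hcons
        obtain ⟨-, htail⟩ := List.cons.inj hcons
        rw [htail, hZval, pvDfo_filter, List.filter_filter]
        congr 1
        apply List.filter_congr
        intro y _
        rw [hu2 y, Bool.and_comm]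
      -- filter u2 qs = filter u qs  (c ∉ qs)
      have hfq : qs.filter (fun x => !pvHasKey (idx ++ [(c, t)]) x)
          = qs.filter (fun x => !pvHasKey idx x) := by
        apply List.filter_congr
        intro y hy
        rw [hu2 y]
        have : y ≠ c := fun h => hcq (h ▸ hy)
        simp [this]
      -- membership bridge: for unindexed-in-idx2 s, s ∈ vis ↔ s ∈ p2.filter u2
      have hbridge : ∀ s, (!pvHasKey (idx ++ [(c, t)]) s) = true →
          (s ∈ vis ↔ s ∈ p2.filter (fun x => !pvHasKey (idx ++ [(c, t)]) x)) := by
        intro s hs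
        rw [hu2 s] at hs
        obtain ⟨hsu, hsc⟩ := (Bool.and_eq_true _ _).mp hs
        have hsc' : s ≠ c := by simpa using hsc
        constructor
        · intro hsv
          rcases h3 s hsv with h | h
          · rw [h] at hsu; simp at hsu
          · rcases List.mem_cons.mp h with h | h
            · exact absurd h hsc'
            · have : s ∈ qs.filter (fun x => !pvHasKey (idx ++ [(c, t)]) x) :=
                List.mem_filter.mpr ⟨h, by rw [hu2 s]; exact hs⟩
              rw [hfq, h5'] at this
              exact (mem_pvDfo _ _).mp this
        · intro hsp
          have : s ∈ pvDfo (p2.filter (fun x => !pvHasKey (idx ++ [(c, t)]) x)) :=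
            (mem_pvDfo _ _).mpr hsp
          rw [← h5', ← hfq] at this
          exact hqv s (List.mem_filter.mp this).1
      refine ih' (p2 ++ pvSrc pm c) h1' h2' ?_ ?_ ?_
      · intro v hv
        rcases List.mem_append.mp hv with hv | hv
        · rcases h3 v hv with h | h
          · exact Or.inl (by rw [pvHasKey_append_single, h]; simp)
          · rcases List.mem_cons.mp h with rfl | h
            · exact Or.inl (by rw [pvHasKey_append_single]; simp)
            · exact Or.inr (List.mem_append_left _ h)
        · exact Or.inr (List.mem_append_right _ hv)
      · intro kv hkv s hs
        rcases List.mem_append.mp hkv with hkv | hkv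
        · rcases h4 kv hkv s hs with h | h
          · exact Or.inl (by rw [pvHasKey_append_single, h]; simp)
          · exact Or.inr (List.mem_append_left _ h)
        · have hkvc : kv = (c, t) := by simpa using hkv
          subst hkvc
          by_cases hsv : s ∈ vis
          · exact Or.inr (List.mem_append_left _ hsv)
          · exact Or.inr (List.mem_append_right _ ((mem_pvNew _ _ _).mpr ⟨hs, hsv⟩))
      · -- the view equation for the next state
        rw [List.filter_append, List.filter_append, pvDfo_append, hfq, h5']
        congr 1
        -- filter u2 N = pvDfo ((srcs.filter u2).filter (∉ p2.filter u2))
        unfold pvNew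
        rw [pvDfo_filter, List.filter_filter, List.filter_filter]
        congr 1
        apply List.filter_congr
        intro s _
        by_cases hsu : (!pvHasKey (idx ++ [(c, t)]) s) = true
        · have hb := hbridge s hsu
          by_cases hsv : s ∈ vis
          · have : s ∈ p2.filter (fun x => !pvHasKey (idx ++ [(c, t)]) x) := hb.mp hsv
            simp [hsu, List.contains_eq_mem, hsv, this]
          · have : s ∉ p2.filter (fun x => !pvHasKey (idx ++ [(c, t)]) x) :=
              fun h => hsv (hb.mpr h)
            simp [hsu, List.contains_eq_mem, hsv, this]
        · simp only [Bool.not_eq_true] at hsu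
          simp [hsu]

-- full closure of the accumulated index (invariant between targets)
def pvClosed (pm : List (String × List String)) (idx : List (String × String)) : Prop :=
  ∀ kv ∈ idx, ∀ s ∈ pvSrc pm kv.1, pvHasKey idx s = true

theorem pvHasKey_ins (t : String) (idx : List (String × String)) (c x : String)
    (h : pvHasKey idx x = true) : pvHasKey (pvIns t idx c) x = true := by
  unfold pvIns
  split
  · exact h
  · unfold pvHasKey at *; simp only [List.any_append, h]; simp

theorem pvHasKey_ins_self (t : String) (idx : List (String × String)) (c : String) :
    pvHasKey (pvIns t idx c) c = true := by
  unfold pvIns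
  split
  · assumption
  · unfold pvHasKey; simp

theorem pvStep_mem (srcs : List String) : ∀ (vis q : List String), ∀ s ∈ srcs,
    s ∈ (srcs.foldl pvStep (vis, q)).1 := by
  induction srcs with
  | nil => simp
  | cons a rest ih =>
    intro vis q s hs
    rcases List.mem_cons.mp hs with rfl | hs
    · simp only [List.foldl_cons, pvStep]
      split
      · obtain ⟨added, heq, -, -⟩ := pvStep_spec rest vis
        rw [heq q]; simp only [List.mem_append]; left; assumption
      · obtain ⟨added, heq, -, -⟩ := pvStep_spec rest (vis ++ [s])
        rw [heq (q ++ [s])]; simp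
    · simp only [List.foldl_cons, pvStep]
      split
      · exact ih vis q s hs
      · exact ih (vis ++ [a]) (q ++ [a]) s hs

-- A's BFS keeps the index closed
theorem pvBfsA_closed (pm : List (String × List String)) (t : String) :
    ∀ (q vis : List String) (idx : List (String × String)),
    (∀ kv ∈ idx, ∀ s ∈ pvSrc pm kv.1, pvHasKey idx s = true ∨ s ∈ vis) →
    (∀ v ∈ vis, pvHasKey idx v = true ∨ v ∈ q) →
    pvClosed pm (pvBfsA pm t q vis idx) := by
  intro q vis idx
  induction q, vis, idx using pvBfsA.induct pm t with
  | case1 vis idx =>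
    intro h1 h2
    rw [pvBfsA.eq_def]
    intro kv hkv s hs
    rcases h1 kv hkv s hs with h | h
    · exact h
    · rcases h2 s h with h' | h'
      · exact h'
      · exact absurd h' (List.not_mem_nil)
  | case2 vis idx c qs idx' pr ih =>
    intro h1 h2
    have hidx : idx' = pvIns t idx c := rfl
    have hpr : pr = List.foldl pvStep (vis, qs) (pvSrc pm c) := rfl
    rw [hidx, hpr] at ih
    rw [pvBfsA.eq_def]
    dsimp only
    obtain ⟨added, heq, hnd, hmem⟩ := pvStep_spec (pvSrc pm c) vis
    refine ih ?_ ?_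
    · intro kv hkv s hs
      rw [heq qs]
      by_cases hkvold : kv ∈ idx
      · rcases h1 kv hkvold s hs with h | h
        · exact Or.inl (pvHasKey_ins t idx c s h)
        · exact Or.inr (List.mem_append_left _ h)
      · have hkc : kv = (c, t) := by
          unfold pvIns at hkv
          split at hkv
          · exact absurd hkv hkvold
          · rcases List.mem_append.mp hkv with h | h
            · exact absurd h hkvold
            · simpa using h
        subst hkc
        have := pvStep_mem (pvSrc pm c) vis qs s hs
        rw [heq qs] at this
        exact Or.inr this
    · intro v hv
      rw [heq qs] at hv ⊢
      rcases List.mem_append.mp hv with hv | hv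
      · rcases h2 v hv with h | h
        · exact Or.inl (pvHasKey_ins t idx c v h)
        · rcases List.mem_cons.mp h with rfl | h
          · exact Or.inl (pvHasKey_ins_self t idx v)
          · exact Or.inr (List.mem_append_left _ h)
      · exact Or.inr (List.mem_append_right _ hv)

-- the outer fold over targets
theorem pvOuter (pm : List (String × List String)) : ∀ (targets : List String)
    (idx : List (String × String)), pvClosed pm idx →
    targets.foldl (fun idx t => pvBfsA pm t [t] [t] idx) idx
      = targets.foldl (fun idx t => pvBfsB pm t [t] idx) idx := by
  intro targets
  induction targets with
  | nil => intro idx _; rfl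
  | cons t rest ih =>
    intro idx hcl
    simp only [List.foldl_cons]
    have hstep : pvBfsA pm t [t] [t] idx = pvBfsB pm t [t] idx := by
      refine pvSim pm t [t] [t] idx [t] (by simp) (by simp) ?_ ?_ ?_
      · intro v hv; exact Or.inr hv
      · intro kv hkv s hs; exact Or.inl (hcl kv hkv s hs)
      · by_cases hk : pvHasKey idx t = true
        · rw [List.filter_cons_of_neg (by simp [hk]), List.filter_nil, pvDfo]
        · rw [List.filter_cons_of_pos (by simp [hk]), List.filter_nil, pvDfo]
          simp [pvDfo]
    rw [← hstep]
    refine ih (pvBfsA pm t [t] [t] idx) ?_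
    refine pvBfsA_closed pm t [t] [t] idx ?_ ?_
    · intro kv hkv s hs; exact Or.inl (hcl kv hkv s hs)
    · intro v hv; exact Or.inr hv

-- ===== VERDICT (by name: the statement is the Claim_ definition above) =====
theorem build_target_ancestry_index_py_spec : Claim_equal_build_target_ancestry_index_py := by
  intro targets pm _
  unfold Spec_build_target_ancestry_index_py build_target_ancestry_index_py build_target_ancestry_index_py_alt
  exact pvOuter pm targets [] (by intro kv hkv; exact absurd hkv List.not_mem_nil)
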